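-- pv_equiv track=rewrite | github.com/shiveshsky/datastructures | dp/lcs/longest_common_substring.py | solve
-- ===== SOURCE A (Python) =====
-- def solve(A, B):
--     lcs = []
--     for row in range(0, len(A) + 1):
--         ro = []
--         for col in range(0, len(B) + 1):
--             ro.append(0)
--         lcs.append(ro)
--     A = list(A)
--     B = list(B)
--     for i in range(1, len(A) + 1):
--         for j in range(1, len(B) + 1):
--             if A[i - 1] == B[j - 1]:
--                 lcs[i][j] = lcs[i - 1][j - 1] + 1
--             else:
--                 lcs[i][j] = 0
--     return lcs[-1][-1]
-- ===== SOURCE B (Python) =====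
-- def solve(A, B):
--     n = 0
--     for x, y in zip(reversed(A), reversed(B)):
--         if x != y:
--             break
--         n += 1
--     return n
-- ===== Notes on version B (the rewrite author's own statement) =====
-- stated objective: faster
-- what changed: replaced the O(len(A)*len(B)) DP table (whose last cell is just the length of the common suffix) by a single backward scan counting matching characters from the ends until the first mismatch
import Mathlib
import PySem

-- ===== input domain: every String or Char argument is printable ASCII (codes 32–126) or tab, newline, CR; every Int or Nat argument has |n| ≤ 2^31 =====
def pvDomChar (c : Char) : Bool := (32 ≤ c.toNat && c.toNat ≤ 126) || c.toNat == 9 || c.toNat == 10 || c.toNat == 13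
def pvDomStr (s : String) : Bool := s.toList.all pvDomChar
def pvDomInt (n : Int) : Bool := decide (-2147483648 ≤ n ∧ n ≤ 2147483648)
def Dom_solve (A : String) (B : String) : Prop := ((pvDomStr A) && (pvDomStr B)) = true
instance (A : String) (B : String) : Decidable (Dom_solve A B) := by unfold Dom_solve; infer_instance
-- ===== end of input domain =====

-- B replaces A's O(|A|*|B|) DP table (whose last cell is the length of the common
-- suffix of A and B) by a single backward scan counting matching characters.

-- ===== PORT A =====
-- literal transliteration of A: build the (|A|+1)×(|B|+1) zero table by appending,
-- fill it with the suffix-DP recurrence, return lcs[-1][-1]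
def solve (A : String) (B : String) : Int :=
  let lcs0 : List (List Int) :=
    (PySem.List.pyRange 0 (PySem.Str.len A + 1) 1).foldl (fun lcs _ =>
      lcs ++ [(PySem.List.pyRange 0 (PySem.Str.len B + 1) 1).foldl
                (fun ro _ => ro ++ [(0 : Int)]) []]) []
  let As := A.toList
  let Bs := B.toList
  let lcs1 :=
    (PySem.List.pyRange 1 ((As.length : Int) + 1) 1).foldl (fun lcs i =>
      (PySem.List.pyRange 1 ((Bs.length : Int) + 1) 1).foldl (fun lcs j =>
        let v : Int :=
          if PySem.List.pyGet? As (i - 1) = PySem.List.pyGet? Bs (j - 1) then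
            PySem.List.pyGetD (PySem.List.pyGetD lcs (i - 1) []) (j - 1) 0 + 1
          else 0
        PySem.List.pySetD lcs i (PySem.List.pySetD (PySem.List.pyGetD lcs i []) j v)) lcs) lcs0
  PySem.List.pyGetD (PySem.List.pyGetD lcs1 (-1) []) (-1) 0

-- ===== PORT B =====
-- 'for x, y in zip(reversed(A), reversed(B)): if x != y: break; n += 1'
def cpz : List (Char × Char) → Int
  | [] => 0
  | (x, y) :: rest => if x ≠ y then 0 else 1 + cpz rest

def solve_alt (A : String) (B : String) : Int :=
  cpz (A.toList.reverse.zip B.toList.reverse)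

-- ===== PRECONDITION & SPEC =====
def Spec_solve (A : String) (B : String) (out : Int) : Prop := out = solve_alt A B
instance (A : String) (B : String) (out : Int) : Decidable (Spec_solve A B out) := by unfold Spec_solve; infer_instance

-- ===== CLAIM (what is proved, stated in full; the proofs are below) =====
def Claim_equal_solve : Prop := ∀ (A : String) (B : String), Dom_solve A B → Spec_solve A B (solve A B)

-- ===== LEMMAS AND PROOFS =====

-- length of the common suffix of the first i chars of As and the first j chars of Bs
def fsuf (As Bs : List Char) (i j : Nat) : Int :=
  cpz (((As.take i).reverse).zip ((Bs.take j).reverse))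

-- the value A's table holds at cell (r, c) once the first i rows have been filled
def gmat (As Bs : List Char) (i r c : Nat) : Int :=
  if 1 ≤ r ∧ r ≤ i ∧ 1 ≤ c then fsuf As Bs r c else 0

theorem fsuf_succ (As Bs : List Char) (k j : Nat) (hk : k < As.length) (hj : j < Bs.length) :
    fsuf As Bs (k + 1) (j + 1) =
      if As[k]? = Bs[j]? then fsuf As Bs k j + 1 else 0 := by
  unfold fsuf
  rw [List.take_add_one, List.take_add_one, List.getElem?_eq_getElem hk, List.getElem?_eq_getElem hj]
  simp only [Option.toList_some, List.reverse_append, List.reverse_cons, List.reverse_nil,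
    List.nil_append, List.cons_append, List.zip_cons_cons, cpz]
  by_cases h : As[k] = Bs[j]
  · simp [h, add_comm]
  · simp [h]

theorem fsuf_zero_left (As Bs : List Char) (j : Nat) : fsuf As Bs 0 j = 0 := by
  simp [fsuf, cpz]
theorem fsuf_zero_right (As Bs : List Char) (i : Nat) : fsuf As Bs i 0 = 0 := by
  simp [fsuf, cpz]

theorem gmat_diag (As Bs : List Char) (k j : Nat) : gmat As Bs k k j = fsuf As Bs k j := by
  unfold gmat
  rcases Nat.eq_zero_or_pos k with hk | hk
  · subst hk; simp [fsuf_zero_left]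
  · rcases Nat.eq_zero_or_pos j with hj | hj
    · subst hj; simp [fsuf_zero_right]
    · rw [if_pos ⟨hk, le_refl _, hj⟩]
def Mmat (As Bs : List Char) (i : Nat) : List (List Int) :=
  (List.range (As.length + 1)).map (fun r =>
    (List.range (Bs.length + 1)).map (fun c => gmat As Bs i r c))
def Nmat (As Bs : List Char) (k j : Nat) : List (List Int) :=
  (List.range (As.length + 1)).map (fun r =>
    (List.range (Bs.length + 1)).map (fun c =>
      if r = k + 1 ∧ 1 ≤ c ∧ c ≤ j then fsuf As Bs (k + 1) c else gmat As Bs k r c))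

theorem Nmat_zero (As Bs : List Char) (k : Nat) : Nmat As Bs k 0 = Mmat As Bs k := by
  unfold Nmat Mmat
  refine List.map_congr_left (fun r _ => List.map_congr_left (fun c _ => ?_))
  rw [if_neg]; rintro ⟨-, hc, hc0⟩; omega

theorem Nmat_full (As Bs : List Char) (k : Nat) :
    Nmat As Bs k Bs.length = Mmat As Bs (k + 1) := by
  unfold Nmat Mmat
  refine List.map_congr_left (fun r hr => List.map_congr_left (fun c hc => ?_))
  rw [List.mem_range] at hr hc
  unfold gmat
  by_cases hrk : r = k + 1
  · subst hrk
    by_cases h1 : 1 ≤ c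
    · rw [if_pos ⟨rfl, h1, by omega⟩, if_pos ⟨by omega, le_refl _, h1⟩]
    · rw [if_neg (by tauto), if_neg (by tauto), if_neg (by tauto)]
  · rw [if_neg (by tauto)]
    by_cases h : 1 ≤ r ∧ r ≤ k ∧ 1 ≤ c
    · rw [if_pos h, if_pos ⟨h.1, by omega, h.2.2⟩]
    · rw [if_neg h, if_neg (by omega)]
theorem inner_step (As Bs : List Char) (k j : Nat) (hk : k < As.length) (hj : j < Bs.length) :
    (PySem.List.pySetD (Nmat As Bs k j) ((1 : Int) + k)
      (PySem.List.pySetD (PySem.List.pyGetD (Nmat As Bs k j) ((1 : Int) + k) []) ((1 : Int) + j)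
        (if PySem.List.pyGet? As (((1 : Int) + k) - 1) = PySem.List.pyGet? Bs (((1 : Int) + j) - 1) then
            PySem.List.pyGetD (PySem.List.pyGetD (Nmat As Bs k j) (((1 : Int) + k) - 1) []) (((1 : Int) + j) - 1) 0 + 1
          else 0)))
      = Nmat As Bs k (j + 1) := by
  have e1 : ((1 : Int) + k) - 1 = ((k : Nat) : Int) := by omega
  have e2 : ((1 : Int) + j) - 1 = ((j : Nat) : Int) := by omega
  have e3 : ((1 : Int) + k) = (((k + 1 : Nat)) : Int) := by push_cast; ring
  have e4 : ((1 : Int) + j) = (((j + 1 : Nat)) : Int) := by push_cast; ring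
  rw [e1, e2, e3, e4]
  simp only [PySem.List.pyGet?_natCast, PySem.List.pyGetD_natCast, PySem.List.pySetD_natCast]
  -- row k of the current table and its entry j
  rw [show (Nmat As Bs k j).getD k [] =
      (List.range (Bs.length + 1)).map (fun c =>
        if k = k + 1 ∧ 1 ≤ c ∧ c ≤ j then fsuf As Bs (k + 1) c else gmat As Bs k k c) from
    PySem.List.getD_map_range _ _ _ _ (by omega)]
  rw [show (Nmat As Bs k j).getD (k+1) [] =
      (List.range (Bs.length + 1)).map (fun c =>
        if k + 1 = k + 1 ∧ 1 ≤ c ∧ c ≤ j then fsuf As Bs (k + 1) c else gmat As Bs k (k+1) c) from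
    PySem.List.getD_map_range _ _ _ _ (by omega)]
  rw [show ((List.range (Bs.length + 1)).map (fun c =>
        if k = k + 1 ∧ 1 ≤ c ∧ c ≤ j then fsuf As Bs (k + 1) c else gmat As Bs k k c)).getD j 0
      = gmat As Bs k k j from by
    rw [PySem.List.getD_map_range _ _ _ _ (by omega : j < Bs.length + 1)]
    exact if_neg (by omega)]
  -- the written value is fsuf (k+1) (j+1)
  have hv : (if As[k]? = Bs[j]? then gmat As Bs k k j + 1 else 0) = fsuf As Bs (k + 1) (j + 1) := by
    rw [gmat_diag, fsuf_succ As Bs k j hk hj]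
  rw [hv]
  -- now compare the two tables elementwise
  apply List.ext_getElem
  · simp [Nmat]
  · intro r h1 h2
    have hr : r < As.length + 1 := by simpa [Nmat] using h2
    rw [List.getElem_set]
    by_cases hrk : k + 1 = r
    · subst hrk
      rw [if_pos rfl]
      unfold Nmat
      rw [List.getElem_map, List.getElem_range]
      apply List.ext_getElem
      · simp
      · intro c hc1 hc2
        have hc : c < Bs.length + 1 := by simpa using hc2
        rw [List.getElem_set]
        simp only [List.getElem_map, List.getElem_range]
        by_cases hcj : j + 1 = c
        · subst hcj
          rw [if_pos rfl, if_pos ⟨trivial, by omega, le_refl _⟩]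
        · rw [if_neg hcj]
          by_cases h : 1 ≤ c ∧ c ≤ j
          · rw [if_pos ⟨trivial, h.1, h.2⟩, if_pos ⟨trivial, h.1, by omega⟩]
          · rw [if_neg (by tauto), if_neg (by omega)]
    · rw [if_neg hrk]
      unfold Nmat
      simp only [List.getElem_map, List.getElem_range]
      apply List.map_congr_left
      intro c _
      rw [if_neg (by omega), if_neg (by omega)]
def ibody (As Bs : List Char) (k : Nat) (lcs : List (List Int)) (t : Nat) : List (List Int) :=
  PySem.List.pySetD lcs ((1 : Int) + k)
    (PySem.List.pySetD (PySem.List.pyGetD lcs ((1 : Int) + k) []) ((1 : Int) + t)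
      (if PySem.List.pyGet? As ((1 : Int) + k - 1) = PySem.List.pyGet? Bs ((1 : Int) + t - 1) then
          PySem.List.pyGetD (PySem.List.pyGetD lcs ((1 : Int) + k - 1) []) ((1 : Int) + t - 1) 0 + 1
        else 0))

theorem inner_loop (As Bs : List Char) (k : Nat) (hk : k < As.length) :
    ∀ j, j ≤ Bs.length →
      (List.range j).foldl (ibody As Bs k) (Nmat As Bs k 0) = Nmat As Bs k j := by
  intro j
  induction j with
  | zero => intro _; rfl
  | succ j ih =>
    intro hj
    rw [List.range_succ, List.foldl_append, ih (by omega)]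
    show ibody As Bs k (Nmat As Bs k j) j = Nmat As Bs k (j + 1)
    exact inner_step As Bs k j hk (by omega)

theorem outer_step (As Bs : List Char) (k : Nat) (hk : k < As.length) :
    (PySem.List.pyRange 1 ((Bs.length : Int) + 1) 1).foldl (fun lcs j =>
        PySem.List.pySetD lcs ((1 : Int) + k)
          (PySem.List.pySetD (PySem.List.pyGetD lcs ((1 : Int) + k) []) j
            (if PySem.List.pyGet? As ((1 : Int) + k - 1) = PySem.List.pyGet? Bs (j - 1) then
                PySem.List.pyGetD (PySem.List.pyGetD lcs ((1 : Int) + k - 1) []) (j - 1) 0 + 1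
              else 0)))
      (Mmat As Bs k) = Mmat As Bs (k + 1) := by
  rw [PySem.List.pyRange_one, show ((Bs.length : Int) + 1 - 1).toNat = Bs.length by omega,
    List.foldl_map, ← Nmat_zero As Bs k]
  exact (inner_loop As Bs k hk Bs.length le_rfl).trans (Nmat_full As Bs k)

theorem outer_loop (As Bs : List Char) :
    ∀ i, i ≤ As.length →
      (List.range i).foldl (fun lcs (k : Nat) =>
          (PySem.List.pyRange 1 ((Bs.length : Int) + 1) 1).foldl (fun lcs j =>
            PySem.List.pySetD lcs ((1 : Int) + (k : Int))
              (PySem.List.pySetD (PySem.List.pyGetD lcs ((1 : Int) + (k : Int)) []) j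
                (if PySem.List.pyGet? As ((1 : Int) + (k : Int) - 1) = PySem.List.pyGet? Bs (j - 1) then
                    PySem.List.pyGetD (PySem.List.pyGetD lcs ((1 : Int) + (k : Int) - 1) []) (j - 1) 0 + 1
                  else 0))) lcs)
        (Mmat As Bs 0) = Mmat As Bs i := by
  intro i
  induction i with
  | zero => intro _; rfl
  | succ i ih =>
    intro hi
    rw [List.range_succ, List.foldl_append, ih (by omega)]
    exact outer_step As Bs i (by omega)

theorem init_eq (As Bs : List Char) :
    (PySem.List.pyRange 0 ((As.length : Int) + 1) 1).foldl (fun lcs _ =>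
        lcs ++ [(PySem.List.pyRange 0 ((Bs.length : Int) + 1) 1).foldl
                  (fun ro _ => ro ++ [(0 : Int)]) []]) [] = Mmat As Bs 0 := by
  rw [PySem.List.foldl_append_singleton_eq_map
        (f := fun _ => (PySem.List.pyRange 0 ((Bs.length : Int) + 1) 1).foldl
                  (fun ro _ => ro ++ [(0 : Int)]) []),
      PySem.List.foldl_append_singleton_eq_map (f := fun _ => (0 : Int))]
  simp only [List.nil_append]
  apply List.ext_getElem
  · simp [Mmat, PySem.List.length_pyRange_one]
  · intro r h1 h2
    simp only [Mmat, List.getElem_map, List.getElem_range]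
    apply List.ext_getElem
    · simp [PySem.List.length_pyRange_one]
    · intro c hc1 hc2
      simp only [List.getElem_map, List.getElem_range]
      unfold gmat
      rw [if_neg (by omega)]

theorem final_eq (As Bs : List Char) :
    PySem.List.pyGetD (PySem.List.pyGetD (Mmat As Bs As.length) (-1) []) (-1) 0
      = cpz (As.reverse.zip Bs.reverse) := by
  have h1 : PySem.List.pyGetD (Mmat As Bs As.length) (-1) []
      = (List.range (Bs.length + 1)).map (fun c => gmat As Bs As.length As.length c) := by
    rw [PySem.List.pyGetD_neg_ofNat _ 1 _ (by omega) (by simp [Mmat])]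
    simp [Mmat]
  rw [h1, PySem.List.pyGetD_neg_ofNat _ 1 _ (by omega) (by simp)]
  simp only [List.length_map, List.length_range, Nat.add_sub_cancel,
    List.getElem_map, List.getElem_range]
  rw [gmat_diag]
  unfold fsuf
  rw [List.take_length, List.take_length]

-- ===== VERDICT (by name: the statement is the Claim_ definition above) =====
theorem solve_spec : Claim_equal_solve := by
  intro A B _
  unfold Spec_solve solve solve_alt
  simp only [PySem.Str.len_eq]
  rw [init_eq A.toList B.toList]
  rw [PySem.List.pyRange_one 1 ((A.toList.length : Int) + 1),
    show ((A.toList.length : Int) + 1 - 1).toNat = A.toList.length by omega, List.foldl_map]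
  exact (congrArg (fun X => PySem.List.pyGetD (PySem.List.pyGetD X (-1) []) (-1) 0)
      (outer_loop A.toList B.toList A.toList.length le_rfl)).trans
    (final_eq A.toList B.toList)
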